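-- pv_equiv track=rewrite | github.com/Kwon-YJ/SQRT_public | 2024/backtest/crypto_816/src/get_perform_daily.py | bar2line
-- ===== SOURCE A (Python) =====
-- def bar2line(bar_dict):
--
--     target = list(bar_dict.values())
--     new_valuse = []
--
--     for var in target:
--         if len(new_valuse) == 0:
--             new_valuse.append(var)
--         else:
--             new_valuse.append(new_valuse[-1] + var)
--
--     result = {}
--     for idx, key in enumerate(bar_dict.keys()):
--         result[key] = new_valuse[idx]
--
--     return result
-- ===== SOURCE B (Python) =====
-- def bar2line(bar_dict):
--     # Alternative algorithm: each cumulative value equals the grand total minus the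
--     # sum of all later values, so one reverse walk subtracts from the grand total and
--     # builds the output back-to-front (then the pair list is reversed into a dict).
--     items = list(bar_dict.items())
--     remaining = 0
--     for _, v in items:
--         remaining += v
--     rev = []
--     for key, var in reversed(items):
--         rev.append((key, remaining))
--         remaining -= var
--     return dict(reversed(rev))
-- ===== Notes on version B (the rewrite author's own statement) =====
-- stated objective: alternative
-- what changed: Instead of accumulating prefix sums forward and reindexing, B computes the grand total once and walks the items in reverse, assigning each key the current remaining total and subtracting its value (cumulative value = total minus suffix sum), building the output back-to-front.
import Mathlib
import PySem

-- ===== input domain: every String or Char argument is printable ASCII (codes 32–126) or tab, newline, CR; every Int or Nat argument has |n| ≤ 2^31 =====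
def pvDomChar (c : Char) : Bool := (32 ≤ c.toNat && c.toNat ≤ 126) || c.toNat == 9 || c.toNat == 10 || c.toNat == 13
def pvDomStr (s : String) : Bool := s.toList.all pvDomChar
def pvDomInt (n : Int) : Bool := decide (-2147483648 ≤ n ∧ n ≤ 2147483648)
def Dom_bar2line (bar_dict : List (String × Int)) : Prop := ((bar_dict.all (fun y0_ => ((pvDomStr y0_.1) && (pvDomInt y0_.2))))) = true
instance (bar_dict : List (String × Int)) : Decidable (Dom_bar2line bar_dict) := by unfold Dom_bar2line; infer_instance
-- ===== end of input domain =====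

-- B replaces A's forward prefix-sum-then-reindex with a reverse walk subtracting from the
-- grand total (cumulative value = total − suffix sum), building the output back-to-front;
-- objective: alternative. Return values proved equal.

-- ===== PORT A =====
def bar2line (bar_dict : List (String × Int)) : List (String × Int) :=
  let d := PySem.Dict.ofList bar_dict
  let target := d.values
  let new_valuse :=
    target.foldl
      (fun acc var =>
        if acc.length = 0 then acc ++ [var]
        else acc ++ [((PySem.List.pyGet? acc (-1)).getD 0) + var])  -- new_valuse[-1]; never none here
      []
  let result :=
    (PySem.List.enumerate d.keys 0).foldl
      (fun r p => r.insert p.2 ((PySem.List.pyGet? new_valuse p.1).getD 0))  -- new_valuse[idx]; never none here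
      PySem.Dict.empty
  result.items

-- ===== PORT B =====
def bar2line_alt (bar_dict : List (String × Int)) : List (String × Int) :=
  let items := (PySem.Dict.ofList bar_dict).items
  let remaining := items.foldl (fun s p => s + p.2) 0
  let st :=
    items.reverse.foldl
      (fun (st : List (String × Int) × Int) p => (st.1 ++ [(p.1, st.2)], st.2 - p.2))
      (([] : List (String × Int)), remaining)
  (PySem.Dict.ofList st.1.reverse).items

-- ===== PRECONDITION & SPEC =====
def Spec_bar2line (bar_dict : List (String × Int)) (out : List (String × Int)) : Prop := out = bar2line_alt bar_dict
instance (bar_dict : List (String × Int)) (out : List (String × Int)) : Decidable (Spec_bar2line bar_dict out) := by unfold Spec_bar2line; infer_instance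

-- ===== CLAIM (what is proved, stated in full; the proofs are below) =====
def Claim_equal_bar2line : Prop := ∀ (bar_dict : List (String × Int)), Dom_bar2line bar_dict → Spec_bar2line bar_dict (bar2line bar_dict)

-- ===== LEMMAS AND PROOFS =====

-- running cumulative sums of the values, starting from total t
def pvCum (l : List Int) (t : Int) : List Int :=
  match l with
  | [] => []
  | v :: r => (t + v) :: pvCum r (t + v)

-- the reference result: items paired with their cumulative totals
def pvGo (l : List (String × Int)) (t : Int) : List (String × Int) :=
  match l with
  | [] => []
  | p :: r => (p.1, t + p.2) :: pvGo r (t + p.2)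

lemma pvGo_eq_zip (l : List (String × Int)) (t : Int) :
    pvGo l t = (l.map (·.1)).zip (pvCum (l.map (·.2)) t) := by
  induction l generalizing t with
  | nil => rfl
  | cons p r ih => simp [pvGo, pvCum, List.zip, ih]

lemma length_pvCum (l : List Int) (t : Int) : (pvCum l t).length = l.length := by
  induction l generalizing t with
  | nil => rfl
  | cons v r ih => simp [pvCum, ih]

-- A's first loop from a nonempty accumulator appends the cum-sums continuing from the last element
lemma A_loop1_aux (l : List Int) (a : List Int) (t : Int) :
    l.foldl
      (fun acc var =>
        if acc.length = 0 then acc ++ [var]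
        else acc ++ [((PySem.List.pyGet? acc (-1)).getD 0) + var])
      (a ++ [t]) = a ++ [t] ++ pvCum l t := by
  induction l generalizing a t with
  | nil => simp [pvCum]
  | cons v r ih =>
    simp only [List.foldl_cons]
    have hne : (a ++ [t]).length = 0 → False := by simp
    rw [if_neg (by intro h; exact hne h)]
    rw [PySem.List.pyGet?_neg_one_append_singleton]
    have := ih (a ++ [t]) (t + v)
    simpa [pvCum, List.append_assoc] using this

lemma A_loop1 (l : List Int) :
    l.foldl
      (fun acc var =>
        if acc.length = 0 then acc ++ [var]
        else acc ++ [((PySem.List.pyGet? acc (-1)).getD 0) + var])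
      [] = pvCum l 0 := by
  cases l with
  | nil => rfl
  | cons v r =>
    simp only [List.foldl_cons, List.length_nil, List.nil_append]
    have := A_loop1_aux r [] v
    simpa [pvCum] using this

-- A's second loop over fresh distinct keys builds exactly keys zipped with looked-up values
lemma A_loop2 (keys : List String) (nv : List Int) (hn : keys.Nodup)
    (hl : keys.length = nv.length) :
    ((PySem.List.enumerate keys 0).foldl
      (fun r p => r.insert p.2 ((PySem.List.pyGet? nv p.1).getD 0))
      (PySem.Dict.empty (κ := String) (ν := Int))).items = keys.zip nv := by
  rw [PySem.Dict.items_foldl_insert_fresh (PySem.List.enumerate keys 0) (·.2)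
      (fun p => (PySem.List.pyGet? nv p.1).getD 0) PySem.Dict.empty
      (by intro a _; simp [PySem.Dict.contains_empty])
      (by simpa [PySem.List.map_snd_enumerate] using hn)]
  have hemp : (PySem.Dict.empty (κ := String) (ν := Int)).items = [] := rfl
  rw [hemp, List.nil_append]
  apply List.ext_getElem
  · simp [PySem.List.length_enumerate, List.length_zip, hl]
  · intro i h1 h2
    have hk : i < keys.length := by simpa [PySem.List.length_enumerate] using h1
    have hv : i < nv.length := hl ▸ hk
    simp [PySem.List.getElem_enumerate, List.getElem_zip,
      PySem.List.pyGet?_natCast, List.getElem?_eq_getElem hv]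

-- ofList over a list with distinct keys returns exactly that list as items
lemma items_ofList_nodup (l : List (String × Int)) (h : (l.map (·.1)).Nodup) :
    (PySem.Dict.ofList l).items = l := by
  have := PySem.Dict.items_foldl_insert_fresh l (·.1) (·.2) PySem.Dict.empty
    (by intro a _; simp [PySem.Dict.contains_empty]) h
  simpa [PySem.Dict.ofList] using this

-- B's sum loop is the sum of the values
lemma B_sum (l : List (String × Int)) (s : Int) :
    l.foldl (fun s p => s + p.2) s = s + (l.map (·.2)).sum := by
  induction l generalizing s with
  | nil => simp
  | cons p r ih => simp [ih, add_assoc]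

-- B's reverse walk from remaining = t + sum appends the reversed cumulative pairs and ends at t
lemma B_loop (l : List (String × Int)) (acc : List (String × Int)) (t : Int) :
    l.reverse.foldl
      (fun (st : List (String × Int) × Int) p => (st.1 ++ [(p.1, st.2)], st.2 - p.2))
      (acc, t + (l.map (·.2)).sum)
    = (acc ++ (pvGo l t).reverse, t) := by
  rw [List.foldl_reverse]
  induction l generalizing t with
  | nil => simp [pvGo]
  | cons p r ih =>
    simp only [List.foldr_cons, List.map_cons, List.sum_cons]
    have h : t + (p.2 + (r.map (·.2)).sum) = (t + p.2) + (r.map (·.2)).sum := by ring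
    rw [h, ih (t + p.2)]
    simp [pvGo, List.append_assoc]

-- ===== VERDICT (by name: the statement is the Claim_ definition above) =====
theorem bar2line_spec : Claim_equal_bar2line := by
  intro bar_dict _
  unfold Spec_bar2line bar2line bar2line_alt
  set d := PySem.Dict.ofList bar_dict with hd
  have hnd : d.keys.Nodup := PySem.Dict.nodup_keys_ofList bar_dict
  have hln : (d.items.map (·.1)).Nodup := by simpa [PySem.Dict.keys] using hnd
  simp only []
  rw [A_loop1, A_loop2 d.keys (pvCum d.values 0) hnd
    (by simp [length_pvCum, PySem.Dict.keys, PySem.Dict.values]),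
    B_sum]
  have hB := B_loop d.items [] 0
  simp only [zero_add] at hB ⊢
  rw [hB]
  simp only [List.nil_append, List.reverse_reverse]
  rw [items_ofList_nodup (pvGo d.items 0)
    (by rw [pvGo_eq_zip]
        simpa [List.map_fst_zip, length_pvCum, PySem.Dict.keys, PySem.Dict.values] using hln),
    pvGo_eq_zip]
  simp [PySem.Dict.keys, PySem.Dict.values]
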